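-- pv_equiv track=rewrite | github.com/tien1868/apoc_appv2 | app.py | get_cat_id
-- ===== SOURCE A (Python) =====
-- CATEGORY_MAP = {
--     "men > sweaters > cardigan":"11484","men > sweaters > pullover":"11484",
--     "men > sweaters":"11484","men > shirts > dress shirt":"57991",
--     "men > shirts > t-shirt":"15687","men > shirts > casual":"57990",
--     "men > shirts":"57990","men > jackets":"57988","men > coats":"57988",
--     "men > vests":"15691","men > pants > jeans":"11483","men > jeans":"11483",
--     "men > pants > dress":"57989","men > pants":"57989","men > shorts":"15689",
--     "men > suits > blazer":"3002","men > suits":"3002","men > blazer":"3002",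
--     "men > activewear":"185101","men > swimwear":"15690",
--     "women > sweaters":"63866","women > tops":"53159","women > blouses":"53159",
--     "women > dresses":"63861","women > jackets":"63862","women > coats":"63862",
--     "women > vests":"63862","women > pants > jeans":"11554","women > jeans":"11554",
--     "women > pants":"63863","women > skirts":"63864","women > shorts":"11555",
--     "women > activewear":"185099","women > swimwear":"63867",
--     "default":"57990",
-- }
--
-- def get_cat_id(s):
--     key = (s or "").lower().strip()
--     if key in CATEGORY_MAP:
--         return CATEGORY_MAP[key]
--     parts = key.split(">")
--     for l in range(len(parts) - 1, 0, -1):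
--         k = " > ".join(p.strip() for p in parts[:l])
--         if k in CATEGORY_MAP:
--             return CATEGORY_MAP[k]
--     return CATEGORY_MAP["default"]
-- ===== SOURCE B (Python) =====
-- CATEGORY_MAP = {
--     "men > sweaters > cardigan":"11484","men > sweaters > pullover":"11484",
--     "men > sweaters":"11484","men > shirts > dress shirt":"57991",
--     "men > shirts > t-shirt":"15687","men > shirts > casual":"57990",
--     "men > shirts":"57990","men > jackets":"57988","men > coats":"57988",
--     "men > vests":"15691","men > pants > jeans":"11483","men > jeans":"11483",
--     "men > pants > dress":"57989","men > pants":"57989","men > shorts":"15689",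
--     "men > suits > blazer":"3002","men > suits":"3002","men > blazer":"3002",
--     "men > activewear":"185101","men > swimwear":"15690",
--     "women > sweaters":"63866","women > tops":"53159","women > blouses":"53159",
--     "women > dresses":"63861","women > jackets":"63862","women > coats":"63862",
--     "women > vests":"63862","women > pants > jeans":"11554","women > jeans":"11554",
--     "women > pants":"63863","women > skirts":"63864","women > shorts":"11555",
--     "women > activewear":"185099","women > swimwear":"63867",
--     "default":"57990",
-- }
--
-- def get_cat_id(s):
--     key = (s or "").lower().strip()
--     if key in CATEGORY_MAP:
--         return CATEGORY_MAP[key]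
--     # one forward pass over the proper prefixes, building the canonical
--     # prefix incrementally and keeping the LAST (longest) match
--     parts = [p.strip() for p in key.split(">")]
--     best = CATEGORY_MAP["default"]
--     prefix = ""
--     for i, p in enumerate(parts[:-1]):
--         prefix = p if i == 0 else prefix + " > " + p
--         if prefix in CATEGORY_MAP:
--             best = CATEGORY_MAP[prefix]
--     return best
-- ===== Notes on version B (the rewrite author's own statement) =====
-- stated objective: alternative
-- what changed: A rebuilds each candidate prefix from scratch (strip+join of a slice) while scanning lengths backward and returning the first hit; B strips the parts once and makes a single forward pass that grows the canonical prefix incrementally, overwriting the running best so the last (longest) hit wins.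
import Mathlib
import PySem

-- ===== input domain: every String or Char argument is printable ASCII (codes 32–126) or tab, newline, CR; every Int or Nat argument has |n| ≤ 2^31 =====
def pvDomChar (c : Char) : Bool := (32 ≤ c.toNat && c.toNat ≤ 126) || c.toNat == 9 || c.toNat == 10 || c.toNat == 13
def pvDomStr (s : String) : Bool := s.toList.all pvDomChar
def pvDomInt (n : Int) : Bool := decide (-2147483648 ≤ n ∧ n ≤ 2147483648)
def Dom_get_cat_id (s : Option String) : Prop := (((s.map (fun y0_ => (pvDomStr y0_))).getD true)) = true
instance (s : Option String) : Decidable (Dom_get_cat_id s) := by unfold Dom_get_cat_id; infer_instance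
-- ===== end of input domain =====

set_option maxRecDepth 10000
set_option maxHeartbeats 1000000

-- B replaces A's backward scan (re-joining a stripped slice for every candidate length) by a single
-- forward pass that strips the parts once and grows the canonical prefix incrementally, keeping the
-- last (= longest) hit; same result, proved equal (objective: alternative decomposition).

def pvMAP : PySem.Dict String String := PySem.Dict.ofList [
  ("men > sweaters > cardigan","11484"),("men > sweaters > pullover","11484"),
  ("men > sweaters","11484"),("men > shirts > dress shirt","57991"),
  ("men > shirts > t-shirt","15687"),("men > shirts > casual","57990"),
  ("men > shirts","57990"),("men > jackets","57988"),("men > coats","57988"),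
  ("men > vests","15691"),("men > pants > jeans","11483"),("men > jeans","11483"),
  ("men > pants > dress","57989"),("men > pants","57989"),("men > shorts","15689"),
  ("men > suits > blazer","3002"),("men > suits","3002"),("men > blazer","3002"),
  ("men > activewear","185101"),("men > swimwear","15690"),
  ("women > sweaters","63866"),("women > tops","53159"),("women > blouses","53159"),
  ("women > dresses","63861"),("women > jackets","63862"),("women > coats","63862"),
  ("women > vests","63862"),("women > pants > jeans","11554"),("women > jeans","11554"),
  ("women > pants","63863"),("women > skirts","63864"),("women > shorts","11555"),
  ("women > activewear","185099"),("women > swimwear","63867"),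
  ("default","57990")]

-- ===== PORT A =====
-- A's loop 'for l in range(len(parts)-1, 0, -1): …' over the countdown range, returning on the
-- first hit; base case is CATEGORY_MAP["default"] ("default" is a key of the map, so [] cannot raise).
def pvScanA (parts : List String) : List Int → String
  | [] => PySem.Dict.getD pvMAP "default" ""
  | l :: rest =>
    match PySem.Dict.get? pvMAP
        (PySem.Str.join " > " ((PySem.List.slice parts none (some l)).map PySem.Str.strip)) with
    | some v => v
    | none => pvScanA parts rest

def get_cat_id (s : Option String) : String :=
  let key := PySem.Str.strip (PySem.Str.lower (s.getD ""))
  match PySem.Dict.get? pvMAP key with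
  | some v => v
  | none =>
    let parts := (PySem.Str.split? key ">").getD []   -- sep ">" ≠ "", so split? is always some
    pvScanA parts (PySem.List.pyRange ((parts.length : Int) - 1) 0 (-1))

-- ===== PORT B =====
-- one step of B's forward pass: grow the canonical prefix, overwrite best on a hit
def pvStepB (acc : String × String) (ip : Int × String) : String × String :=
  let pre := if ip.1 == 0 then ip.2 else acc.1 ++ " > " ++ ip.2
  match PySem.Dict.get? pvMAP pre with
  | some v => (pre, v)
  | none => (pre, acc.2)

def get_cat_id_alt (s : Option String) : String :=
  let key := PySem.Str.strip (PySem.Str.lower (s.getD ""))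
  match PySem.Dict.get? pvMAP key with
  | some v => v
  | none =>
    let parts := ((PySem.Str.split? key ">").getD []).map PySem.Str.strip
    ((PySem.List.enumerate (PySem.List.slice parts none (some (-1))) 0).foldl
        pvStepB ("", PySem.Dict.getD pvMAP "default" "")).2

-- ===== PRECONDITION & SPEC =====
def Spec_get_cat_id (s : Option String) (out : String) : Prop := out = get_cat_id_alt s
instance (s : Option String) (out : String) : Decidable (Spec_get_cat_id s out) := by unfold Spec_get_cat_id; infer_instance

-- ===== CLAIM (what is proved, stated in full; the proofs are below) =====
def Claim_equal_get_cat_id : Prop := ∀ (s : Option String), Dom_get_cat_id s → Spec_get_cat_id s (get_cat_id s)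

-- ===== LEMMAS AND PROOFS =====

-- the list of prefixes B's pass visits, starting after an initial prefix `pre`
def pvPrefList : String → List String → List String
  | _, [] => []
  | pre, q :: qs => (pre ++ " > " ++ q) :: pvPrefList (pre ++ " > " ++ q) qs

theorem pvScanA_eq (parts : List String) (L : List Int) :
    pvScanA parts L =
      (L.findSome? (fun l => PySem.Dict.get? pvMAP
        (PySem.Str.join " > " ((PySem.List.slice parts none (some l)).map PySem.Str.strip)))).getD
        (PySem.Dict.getD pvMAP "default" "") := by
  induction L with
  | nil => rfl
  | cons l rest ih =>
    simp only [pvScanA, List.findSome?]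
    cases PySem.Dict.get? pvMAP
        (PySem.Str.join " > " ((PySem.List.slice parts none (some l)).map PySem.Str.strip)) with
    | some v => rfl
    | none => exact ih

theorem pvChars_join_append (sep x : List Char) (xs : List (List Char)) (h : xs ≠ []) :
    PySem.Chars.join sep (xs ++ [x]) = PySem.Chars.join sep xs ++ sep ++ x := by
  induction xs with
  | nil => exact absurd rfl h
  | cons p ps ih =>
    cases ps with
    | nil => simp [PySem.Chars.join_cons_cons, PySem.Chars.join_singleton]
    | cons q qs =>
      have ihh := ih (by simp)
      simp only [List.cons_append] at ihh ⊢
      rw [PySem.Chars.join_cons_cons sep p q (qs ++ [x]), PySem.Chars.join_cons_cons sep p q qs,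
        ihh]
      simp [List.append_assoc]

theorem pvStr_join_singleton (p : String) : PySem.Str.join " > " [p] = p := by
  apply String.toList_inj.mp
  simp [PySem.Str.toList_join, PySem.Chars.join_singleton]

theorem pvStr_join_append (ps : List String) (q : String) (h : ps ≠ []) :
    PySem.Str.join " > " (ps ++ [q]) = PySem.Str.join " > " ps ++ " > " ++ q := by
  apply String.toList_inj.mp
  simp only [PySem.Str.toList_join, List.map_append, List.map_cons, List.map_nil,
    String.toList_append]
  rw [pvChars_join_append _ _ _ (by simpa using h)]

theorem pvPrefList_eq (rest : List String) (pref : List String) (h : pref ≠ []) :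
    pvPrefList (PySem.Str.join " > " pref) rest =
      (List.range rest.length).map (fun k => PySem.Str.join " > " (pref ++ rest.take (k+1))) := by
  induction rest generalizing pref with
  | nil => rfl
  | cons q rest' ih =>
    simp only [pvPrefList, ← pvStr_join_append pref q h]
    rw [ih (pref ++ [q]) (by simp), List.length_cons, List.range_succ_eq_map]
    simp [List.map_map, Function.comp]

theorem pvFoldB (qs : List String) (j : Int) (pre best : String) (hj : 1 ≤ j) :
    ((PySem.List.enumerate qs j).foldl pvStepB (pre, best)).2 =
      ((pvPrefList pre qs).reverse.findSome? (PySem.Dict.get? pvMAP)).getD best := by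
  induction qs generalizing j pre best with
  | nil => rfl
  | cons q qs' ih =>
    rw [PySem.List.enumerate_cons, List.foldl_cons]
    have hne : (j == 0) = false := by rw [beq_eq_false_iff_ne]; omega
    simp only [pvStepB, hne, Bool.false_eq_true, if_false]
    rw [pvPrefList, List.reverse_cons, List.findSome?_append]
    cases hget : PySem.Dict.get? pvMAP (pre ++ " > " ++ q) with
    | some v =>
      rw [ih (j+1) _ _ (by omega)]
      cases hfs : (pvPrefList (pre ++ " > " ++ q) qs').reverse.findSome? (PySem.Dict.get? pvMAP) <;>
        simp_all [List.findSome?, Option.or]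
    | none =>
      rw [ih (j+1) _ _ (by omega)]
      cases hfs : (pvPrefList (pre ++ " > " ++ q) qs').reverse.findSome? (PySem.Dict.get? pvMAP) <;>
        simp_all [List.findSome?, Option.or]

theorem pvStr_arg (parts : List String) (k : Nat) :
    PySem.Str.join " > " ((PySem.List.slice parts none (some ((1:Int) + k))).map PySem.Str.strip) =
      PySem.Str.join " > " ((parts.map PySem.Str.strip).take (k+1)) := by
  rw [PySem.List.slice_to _ (by omega)]
  have h1 : ((1:Int) + k).toNat = k + 1 := by omega
  rw [h1, List.map_take]

theorem pvTakeEq (P : List String) (p0 : String) (qs : List String)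
    (h : P.dropLast = p0 :: qs) (m : Nat) (hm : m ≤ qs.length + 1) :
    P.take m = (p0 :: qs).take m := by
  have hlen : P.dropLast.length = P.length - 1 := List.length_dropLast
  rw [h] at hlen
  simp only [List.length_cons] at hlen
  have : P.take m = (P.take (P.length - 1)).take m := by
    rw [List.take_take]
    congr 1
    omega
  rw [this, ← List.dropLast_eq_take, h]

theorem pvListEq (P : List String) (p0 : String) (qs : List String) (h : P.dropLast = p0 :: qs) :
    (List.range (qs.length + 1)).map (fun k => PySem.Str.join " > " (P.take (k+1))) =
      p0 :: pvPrefList p0 qs := by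
  rw [List.range_succ_eq_map]
  rw [List.map_cons, List.map_map]
  have h1 : PySem.Str.join " > " (P.take 1) = p0 := by
    rw [pvTakeEq P p0 qs h 1 (by omega)]
    exact pvStr_join_singleton p0
  have h2 : List.map ((fun k => PySem.Str.join " > " (P.take (k+1))) ∘ Nat.succ)
      (List.range qs.length) =
      List.map (fun k => PySem.Str.join " > " ([p0] ++ qs.take (k+1))) (List.range qs.length) := by
    apply List.map_congr_left
    intro k hk
    simp only [Function.comp_apply, Nat.succ_eq_add_one]
    rw [pvTakeEq P p0 qs h (k+1+1) (by simp at hk; omega)]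
    rfl
  rw [h2, ← pvPrefList_eq qs [p0] (by simp), pvStr_join_singleton]
  simp [h1]

theorem pvBranch (parts : List String) :
    pvScanA parts (PySem.List.pyRange ((parts.length : Int) - 1) 0 (-1)) =
      ((PySem.List.enumerate (PySem.List.slice (parts.map PySem.Str.strip) none (some (-1))) 0).foldl
        pvStepB ("", PySem.Dict.getD pvMAP "default" "")).2 := by
  rw [PySem.List.slice_to_neg_one]
  rw [pvScanA_eq, PySem.List.pyRange_neg_one_eq_reverse]
  have e1 : ((parts.length : Int) - 1) + 1 = (parts.length : Int) := by ring
  have e2 : ((0:Int) + 1) = 1 := by ring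
  rw [e1, e2, PySem.List.pyRange_one]
  have e3 : ((parts.length : Int) - 1).toNat = (parts.map PySem.Str.strip).dropLast.length := by
    rw [List.length_dropLast, List.length_map]
    omega
  rw [e3]
  rw [← List.map_reverse, List.findSome?_map]
  have e4 : ((fun l => PySem.Dict.get? pvMAP
        (PySem.Str.join " > " ((PySem.List.slice parts none (some l)).map PySem.Str.strip))) ∘
        (fun k : Nat => (1:Int) + k)) =
      fun k : Nat => PySem.Dict.get? pvMAP
        (PySem.Str.join " > " ((parts.map PySem.Str.strip).take (k+1))) := by
    funext k
    simp only [Function.comp_apply]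
    rw [pvStr_arg]
  rw [e4]
  -- move the string-building map outside the findSome?
  rw [show (fun k : Nat => PySem.Dict.get? pvMAP
        (PySem.Str.join " > " ((parts.map PySem.Str.strip).take (k+1)))) =
      (PySem.Dict.get? pvMAP) ∘ (fun k : Nat =>
        PySem.Str.join " > " ((parts.map PySem.Str.strip).take (k+1))) from rfl]
  rw [← List.findSome?_map, List.map_reverse]
  cases hP : (parts.map PySem.Str.strip).dropLast with
  | nil => rfl
  | cons p0 qs =>
    simp only [List.length_cons]
    rw [pvListEq (parts.map PySem.Str.strip) p0 qs hP]
    rw [PySem.List.enumerate_cons, List.foldl_cons]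
    have h0 : ((0:Int) == 0) = true := by rfl
    simp only [pvStepB, h0, if_true]
    rw [List.reverse_cons, List.findSome?_append]
    cases hget : PySem.Dict.get? pvMAP p0 with
    | some v =>
      dsimp only
      rw [e2, pvFoldB qs 1 p0 v (by omega)]
      cases hfs : (pvPrefList p0 qs).reverse.findSome? (PySem.Dict.get? pvMAP) <;>
        simp_all [List.findSome?, Option.or]
    | none =>
      dsimp only
      rw [e2, pvFoldB qs 1 p0 _ (by omega)]
      cases hfs : (pvPrefList p0 qs).reverse.findSome? (PySem.Dict.get? pvMAP) <;>
        simp_all [List.findSome?, Option.or]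

theorem get_cat_id_eq_alt (s : Option String) : get_cat_id s = get_cat_id_alt s := by
  cases hk : PySem.Dict.get? pvMAP (PySem.Str.strip (PySem.Str.lower (s.getD ""))) with
  | some v => simp only [get_cat_id, get_cat_id_alt, hk]
  | none => simp only [get_cat_id, get_cat_id_alt, hk]; exact pvBranch _

-- ===== VERDICT (by name: the statement is the Claim_ definition above) =====
theorem get_cat_id_spec : Claim_equal_get_cat_id := fun s _ => get_cat_id_eq_alt s
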